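-- pv_equiv track=rewrite | github.com/LastSpot/CodeForces | In Python/Submitted/Thanos Sort - CodeForces Submit.py | thanos
-- ===== SOURCE A (Python) =====
-- def firstHalf(snapLength, array):
--     del array[0:snapLength]
--     return array
--
-- def secondHalf(snapLength, array):
--     del array[snapLength:len(array)]
--     return array
--
-- def thanos(array):
--     snapLength = int(len(array)/2)
--     while not sorted(array):
--         array1 = array.copy()
--         array2 = array.copy()
--         a = firstHalf(snapLength,array1)
--         b = secondHalf(snapLength,array2)
--         len_a = thanos(a)
--         len_b = thanos(b)
--         if len_a > len_b:
--             return len_a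
--         else:
--             return len_b
--     return len(array)
--
-- def sorted(array):
--     for x in range(len(array)-1):
--         if array[x] > array[x+1]:
--             return False
--     return True
-- ===== SOURCE B (Python) =====
-- def thanos(array):
--     n = len(array)
--     # run[i] = length of the maximal nondecreasing run starting at i
--     run = [1] * n
--     for i in range(n - 2, -1, -1):
--         if array[i] <= array[i + 1]:
--             run[i] = run[i + 1] + 1
--
--     def solve(i, j):
--         if j - i <= 1 or j - i <= run[i]:
--             return j - i
--         m = i + (j - i) // 2
--         return max(solve(i, m), solve(m, j))
--
--     return solve(0, n)
-- ===== Notes on version B (the rewrite author's own statement) =====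
-- stated objective: faster
-- what changed: Instead of copying both halves and re-scanning each copy for sortedness at every recursion level, B precomputes a run-length table once and recurses on index pairs, answering each segment's sortedness check in O(1) with no list copying.
import Mathlib
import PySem

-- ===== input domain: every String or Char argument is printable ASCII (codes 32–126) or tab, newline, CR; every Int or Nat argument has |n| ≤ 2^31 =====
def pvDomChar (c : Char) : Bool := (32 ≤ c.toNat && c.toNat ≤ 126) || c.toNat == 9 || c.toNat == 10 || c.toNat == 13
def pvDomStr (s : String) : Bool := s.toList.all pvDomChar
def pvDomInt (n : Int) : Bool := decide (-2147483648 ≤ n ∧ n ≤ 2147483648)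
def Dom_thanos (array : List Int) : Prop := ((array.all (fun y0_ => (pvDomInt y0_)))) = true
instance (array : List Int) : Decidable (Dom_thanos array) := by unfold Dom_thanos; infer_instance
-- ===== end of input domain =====

-- B replaces A's copy-the-halves recursion (which re-scans each copied segment for
-- sortedness) with a precomputed run-length table and index-pair recursion; same value.

-- ===== PORT A =====
-- port of A's helper `sorted`: the loop `for x in range(len-1): if a[x] > a[x+1]: return False`
-- scans adjacent pairs left to right, here as the obvious structural recursion over the list
def chkSorted : List Int → Bool
  | a :: b :: t => if a > b then false else chkSorted (b :: t)
  | _ => true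

lemma chkSorted_false_len {l : List Int} (h : chkSorted l = false) : 2 ≤ l.length := by
  match l with
  | [] => simp [chkSorted] at h
  | [_] => simp [chkSorted] at h
  | _ :: _ :: _ => simp

-- `firstHalf` deletes the first snapLength elements (→ drop); `secondHalf` deletes the rest
-- (→ take); `int(len(array)/2)` is floor division for a nonnegative length (float-exact here)
def thanos (array : List Int) : Int :=
  let snapLength := array.length / 2
  if chkSorted array then (array.length : Int)
  else
    let a := array.drop snapLength
    let b := array.take snapLength
    let len_a := thanos a
    let len_b := thanos b
    if len_a > len_b then len_a else len_b
termination_by array.length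
decreasing_by
  · have := chkSorted_false_len (by simpa using ‹¬ chkSorted array = true›)
    simp only [List.length_drop]; omega
  · have := chkSorted_false_len (by simpa using ‹¬ chkSorted array = true›)
    simp only [List.length_take]; omega

-- ===== PORT B =====
-- run-length table: entry i is the length of the maximal nondecreasing run starting at i,
-- built back to front as in Source B's backward loop
def runLens : List Int → List Nat
  | [] => []
  | [_] => [1]
  | a :: b :: t =>
      let rs := runLens (b :: t)
      (if a ≤ b then rs.headD 0 + 1 else 1) :: rs

def solveB (r : List Nat) (i j : Nat) : Int :=
  if j - i ≤ 1 ∨ j - i ≤ r.getD i 0 then ((j - i : Nat) : Int)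
  else
    let m := i + (j - i) / 2
    max (solveB r i m) (solveB r m j)
termination_by j - i
decreasing_by all_goals omega

def thanos_alt (array : List Int) : Int := solveB (runLens array) 0 array.length

-- ===== PRECONDITION & SPEC =====
def Spec_thanos (array : List Int) (out : Int) : Prop := out = thanos_alt array
instance (array : List Int) (out : Int) : Decidable (Spec_thanos array out) := by unfold Spec_thanos; infer_instance

-- ===== CLAIM (what is proved, stated in full; the proofs are below) =====
def Claim_equal_thanos : Prop := ∀ (array : List Int), Dom_thanos array → Spec_thanos array (thanos array)

-- ===== LEMMAS AND PROOFS =====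

lemma if_gt_eq_max (a b : Int) : (if a > b then a else b) = max a b := by
  rw [max_def]; split_ifs <;> omega

lemma thanos_sorted {l : List Int} (h : chkSorted l = true) : thanos l = (l.length : Int) := by
  rw [thanos, h]
  simp

lemma thanos_unsorted {l : List Int} (h : chkSorted l = false) :
    thanos l = max (thanos (l.drop (l.length / 2))) (thanos (l.take (l.length / 2))) := by
  rw [thanos, h]
  simp only [Bool.false_eq_true, if_false, if_gt_eq_max]

lemma solveB_base (r : List Nat) (i j : Nat) (h : j - i ≤ 1 ∨ j - i ≤ r.getD i 0) :
    solveB r i j = ((j - i : Nat) : Int) := by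
  rw [solveB, if_pos h]

lemma solveB_step (r : List Nat) (i j : Nat) (h : ¬ (j - i ≤ 1 ∨ j - i ≤ r.getD i 0)) :
    solveB r i j = max (solveB r i (i + (j - i) / 2)) (solveB r (i + (j - i) / 2) j) := by
  rw [solveB, if_neg h]

-- core: the run table answers "is the segment of length k starting at i sorted?"
lemma runLens_getD_iff : ∀ (a : List Int) (i k : Nat), i + k ≤ a.length →
    (k ≤ (runLens a).getD i 0 ↔ chkSorted ((a.drop i).take k) = true) := by
  intro a
  induction a using runLens.induct with
  | case1 =>
      intro i k h
      simp at h
      simp [h.1, h.2, runLens, chkSorted]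
  | case2 x =>
      intro i k h
      have hc : (i = 0 ∧ k = 0) ∨ (i = 0 ∧ k = 1) ∨ (i = 1 ∧ k = 0) := by
        simp at h; omega
      rcases hc with ⟨rfl, rfl⟩ | ⟨rfl, rfl⟩ | ⟨rfl, rfl⟩ <;> simp [runLens, chkSorted]
  | case3 x y t ih =>
      intro i k h
      match i, k with
      | 0, 0 => simp [chkSorted]
      | 0, 1 =>
          refine ⟨fun _ => rfl, fun _ => ?_⟩
          rw [show runLens (x :: y :: t)
              = (if x ≤ y then (runLens (y :: t)).headD 0 + 1 else 1) :: runLens (y :: t) from rfl,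
            List.getD_cons_zero]
          split <;> omega
      | 0, (k' + 2) =>
          have h' : 0 + (k' + 1) ≤ (y :: t).length := by simp at h ⊢; omega
          have hIH := ih 0 (k' + 1) h'
          simp only [List.drop_zero] at hIH ⊢
          rw [show (y :: t).take (k' + 1) = y :: t.take k' from rfl] at hIH
          rw [show (x :: y :: t).take (k' + 2) = x :: y :: t.take k' from rfl]
          rw [show runLens (x :: y :: t)
              = (if x ≤ y then (runLens (y :: t)).headD 0 + 1 else 1) :: runLens (y :: t) from rfl,
            List.getD_cons_zero]
          rw [show chkSorted (x :: y :: t.take k')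
              = if x > y then false else chkSorted (y :: t.take k') from rfl]
          have hd : (runLens (y :: t)).headD 0 = (runLens (y :: t)).getD 0 0 := by
            cases runLens (y :: t) <;> rfl
          by_cases hxy : x ≤ y
          · rw [if_pos hxy, if_neg (by omega : ¬ x > y), hd]
            constructor
            · intro hk2; exact hIH.mp (by omega)
            · intro hc; have := hIH.mpr hc; omega
          · rw [if_neg hxy, if_pos (by omega : x > y)]
            constructor
            · intro hk2; exact absurd hk2 (by omega)
            · intro hc; simp at hc
      | (i' + 1), k =>
          have h' : i' + k ≤ (y :: t).length := by simp at h ⊢; omega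
          have hIH := ih i' k h'
          rw [show runLens (x :: y :: t)
              = (if x ≤ y then (runLens (y :: t)).headD 0 + 1 else 1) :: runLens (y :: t) from rfl,
            List.getD_cons_succ]
          rw [show (x :: y :: t).drop (i' + 1) = (y :: t).drop i' from rfl]
          exact hIH

-- the main bridge: B's index recursion over the run table computes A's value on each segment
lemma solveB_eq_thanos (a : List Int) : ∀ (k i j : Nat), j - i = k → i ≤ j → j ≤ a.length →
    solveB (runLens a) i j = thanos ((a.drop i).take (j - i)) := by
  intro k
  induction k using Nat.strong_induction_on with
  | _ k ih =>
  intro i j hk hij hj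
  have hseglen : ((a.drop i).take (j - i)).length = j - i := by
    rw [List.length_take, List.length_drop]; omega
  have hsortiff := runLens_getD_iff a i (j - i) (by omega)
  by_cases hs : chkSorted ((a.drop i).take (j - i)) = true
  · rw [solveB_base _ _ _ (Or.inr (hsortiff.mpr hs)), thanos_sorted hs, hseglen]
  · have hsB : chkSorted ((a.drop i).take (j - i)) = false := by
      cases hb : chkSorted ((a.drop i).take (j - i))
      · rfl
      · exact absurd hb hs
    have h2' := chkSorted_false_len hsB
    rw [hseglen] at h2'
    have hnr : ¬ (j - i ≤ (runLens a).getD i 0) := fun hle => hs (hsortiff.mp hle)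
    rw [solveB_step _ _ _ (by omega)]
    rw [thanos_unsorted hsB, hseglen]
    set s := (j - i) / 2 with hs_def
    have hm1 : ((a.drop i).take (j - i)).drop s = (a.drop (i + s)).take (j - (i + s)) := by
      rw [List.drop_take, List.drop_drop, show j - i - s = j - (i + s) from by omega]
    have hm2 : ((a.drop i).take (j - i)).take s = (a.drop i).take ((i + s) - i) := by
      rw [List.take_take, show min s (j - i) = (i + s) - i from by omega]
    rw [hm1, hm2]
    rw [← ih (j - (i + s)) (by omega) (i + s) j rfl (by omega) (by omega),
        ← ih ((i + s) - i) (by omega) i (i + s) rfl (by omega) (by omega)]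
    exact max_comm _ _

-- ===== VERDICT (by name: the statement is the Claim_ definition above) =====
theorem thanos_spec : Claim_equal_thanos := by
  intro array _
  unfold Spec_thanos thanos_alt
  rw [solveB_eq_thanos array array.length 0 array.length (by omega) (by omega) le_rfl]
  simp
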